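-- pv_equiv track=rewrite | github.com/MinhHaDuong/Oeconomia-Climate-finance | scripts/gen_missing_references.py | _format_output_lines
-- ===== SOURCE A (Python) =====
-- def _format_output_lines(doi_lines, url_lines, isbn_lines, no_id_lines):
--     """Combine identifier sections with blank-line separators."""
--     sections = [doi_lines, url_lines, isbn_lines]
--     lines = []
--     for section in sections:
--         if section:
--             if lines:
--                 lines.append("")
--             lines.extend(section)
--     if no_id_lines:
--         if lines:
--             lines.append("")
--         lines.append("# No DOI or ISBN:")
--         lines.extend(no_id_lines)
--     return lines
-- ===== SOURCE B (Python) =====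
-- def _format_output_lines(doi_lines, url_lines, isbn_lines, no_id_lines):
--     """Combine identifier sections with blank-line separators."""
--     tail = ["# No DOI or ISBN:"] + list(no_id_lines) if no_id_lines else []
--     for section in (isbn_lines, url_lines, doi_lines):
--         if section:
--             tail = list(section) + ([""] + tail if tail else [])
--     return tail
-- ===== Notes on version B (the rewrite author's own statement) =====
-- stated objective: alternative
-- what changed: B constructs the result back-to-front: it starts from the trailing no-id block (with its header) and walks the sections in reverse order, prepending each non-empty section with a blank separator decided by whether a suffix already exists, instead of A's forward pass with an 'if lines:' prefix flag and a special trailing branch.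
import Mathlib
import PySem

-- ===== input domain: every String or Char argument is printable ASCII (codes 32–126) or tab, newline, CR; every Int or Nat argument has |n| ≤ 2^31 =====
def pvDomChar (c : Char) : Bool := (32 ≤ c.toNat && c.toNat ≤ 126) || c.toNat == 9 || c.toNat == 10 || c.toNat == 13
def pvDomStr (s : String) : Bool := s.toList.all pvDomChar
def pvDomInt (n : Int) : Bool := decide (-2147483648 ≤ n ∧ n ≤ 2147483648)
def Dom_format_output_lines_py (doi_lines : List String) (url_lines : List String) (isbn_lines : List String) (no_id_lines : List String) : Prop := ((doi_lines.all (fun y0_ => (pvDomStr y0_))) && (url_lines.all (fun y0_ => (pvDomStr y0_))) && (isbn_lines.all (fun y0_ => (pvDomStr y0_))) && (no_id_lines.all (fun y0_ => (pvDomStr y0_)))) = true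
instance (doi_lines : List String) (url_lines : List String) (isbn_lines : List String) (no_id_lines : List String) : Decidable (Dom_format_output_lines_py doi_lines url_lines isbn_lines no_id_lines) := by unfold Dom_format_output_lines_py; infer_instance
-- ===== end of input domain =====

-- B builds the output back-to-front: reverse section traversal prepending onto a suffix, with the separator decided by the suffix (alternative decomposition, same cost).


-- ===== PORT A =====
def format_output_lines_py (doi_lines : List String) (url_lines : List String) (isbn_lines : List String) (no_id_lines : List String) : List String :=
  let sections := [doi_lines, url_lines, isbn_lines]
  let lines := sections.foldl (fun lines sec =>
    if sec ≠ [] then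
      (if lines ≠ [] then lines ++ [""] else lines) ++ sec
    else lines) []
  if no_id_lines ≠ [] then
    ((if lines ≠ [] then lines ++ [""] else lines) ++ ["# No DOI or ISBN:"]) ++ no_id_lines
  else lines

-- ===== PORT B =====
def format_output_lines_py_alt (doi_lines : List String) (url_lines : List String) (isbn_lines : List String) (no_id_lines : List String) : List String :=
  let tail := if no_id_lines ≠ [] then "# No DOI or ISBN:" :: no_id_lines else []
  [isbn_lines, url_lines, doi_lines].foldl (fun tail sec =>
    if sec ≠ [] then sec ++ (if tail ≠ [] then "" :: tail else []) else tail) tail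

-- ===== PRECONDITION & SPEC =====
def Spec_format_output_lines_py (doi_lines : List String) (url_lines : List String) (isbn_lines : List String) (no_id_lines : List String) (out : List String) : Prop := out = format_output_lines_py_alt doi_lines url_lines isbn_lines no_id_lines
instance (doi_lines : List String) (url_lines : List String) (isbn_lines : List String) (no_id_lines : List String) (out : List String) : Decidable (Spec_format_output_lines_py doi_lines url_lines isbn_lines no_id_lines out) := by unfold Spec_format_output_lines_py; infer_instance

-- ===== CLAIM =====
def Claim_equal_format_output_lines_py : Prop := ∀ (doi_lines : List String) (url_lines : List String) (isbn_lines : List String) (no_id_lines : List String), Dom_format_output_lines_py doi_lines url_lines isbn_lines no_id_lines → Spec_format_output_lines_py doi_lines url_lines isbn_lines no_id_lines (format_output_lines_py doi_lines url_lines isbn_lines no_id_lines)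

-- ===== LEMMAS AND PROOFS =====

-- ===== VERDICT =====
theorem format_output_lines_py_spec : Claim_equal_format_output_lines_py := by
  intro d u i n _
  unfold Spec_format_output_lines_py format_output_lines_py format_output_lines_py_alt
  rcases d with _ | ⟨x, xs⟩ <;> rcases u with _ | ⟨y, ys⟩ <;>
    rcases i with _ | ⟨z, zs⟩ <;> rcases n with _ | ⟨w, ws⟩ <;> simp
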